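-- pv_equiv track=rewrite | github.com/sorghumking/aoc2018 | day6.py | get_totals
-- ===== SOURCE A (Python) =====
-- def get_totals(coords, xmin, xmax, ymin, ymax):
--     totals = {} # accumulate closest points for each coord in noninfinite
--     for y in range(ymin, ymax):
--         for x in range(xmin, xmax):
--             closest = find_closest((x,y), coords)
--             if closest:
--                 if closest in totals:
--                     totals[closest] += 1
--                 else:
--                     totals[closest] = 1
--     return totals
--
-- def find_closest(pt, coords):
--     dists = {}
--     for c in coords:
--         dists[c] = dist(pt, c)
--         if dists[c] == 0:
--             return c
--     mindist = min(dists.items(), key=lambda x:x[1]) # find min dist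
--     if len([d for d in dists.values() if d == mindist[1]]) > 1:
--         return None # more than one closest
--     else:
--         return mindist[0]
--
-- def dist(pt1, pt2):
--     return abs(pt1[0] - pt2[0]) + abs(pt1[1] - pt2[1])
-- ===== SOURCE B (Python) =====
-- def closest_unique(pt, uniq):
--     # uniq has no duplicates; single pass tracking the first minimum and a tie flag
--     if not uniq:
--         return None
--     px, py = pt
--     best = uniq[0]
--     bestd = abs(px - best[0]) + abs(py - best[1])
--     tie = False
--     for c in uniq[1:]:
--         d = abs(px - c[0]) + abs(py - c[1])
--         if d < bestd:
--             best, bestd, tie = c, d, False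
--         elif d == bestd:
--             tie = True
--     if tie:
--         return None
--     return best
--
-- def get_totals(coords, xmin, xmax, ymin, ymax):
--     uniq = list(dict.fromkeys(coords))
--     totals = {}
--     for y in range(ymin, ymax):
--         for x in range(xmin, xmax):
--             best = closest_unique((x, y), uniq)
--             if best is not None:
--                 totals[best] = totals.get(best, 0) + 1
--     return totals
-- ===== Notes on version B (the rewrite author's own statement) =====
-- stated objective: alternative
-- what changed: Per grid cell, A builds a dict of all distances, takes min(items) and re-scans the values to count minima; B dedups the coordinates once up front and finds the nearest coordinate in one pass with a running (best, bestd, tie) tracker, no per-cell dict or extra scans.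
import Mathlib
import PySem

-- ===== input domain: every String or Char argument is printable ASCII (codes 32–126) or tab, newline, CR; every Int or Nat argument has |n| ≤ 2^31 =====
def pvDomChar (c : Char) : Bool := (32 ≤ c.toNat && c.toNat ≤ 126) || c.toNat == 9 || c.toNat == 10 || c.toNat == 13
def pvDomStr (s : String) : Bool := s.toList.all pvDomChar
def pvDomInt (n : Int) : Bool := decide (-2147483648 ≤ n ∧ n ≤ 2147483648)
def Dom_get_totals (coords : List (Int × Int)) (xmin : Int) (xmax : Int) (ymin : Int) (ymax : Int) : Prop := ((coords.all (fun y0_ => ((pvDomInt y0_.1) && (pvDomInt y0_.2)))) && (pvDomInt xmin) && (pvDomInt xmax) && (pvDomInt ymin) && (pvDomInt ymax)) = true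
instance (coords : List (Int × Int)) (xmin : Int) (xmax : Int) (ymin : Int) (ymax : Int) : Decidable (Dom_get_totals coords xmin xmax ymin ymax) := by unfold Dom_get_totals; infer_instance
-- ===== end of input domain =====

-- B dedups the coordinates once and finds each cell's nearest coordinate in one pass
-- (running first-minimum + tie flag) instead of A's per-cell dict of distances, min() and
-- a value re-scan.

-- ===== PORT A =====
def pvDist (p c : Int × Int) : Int := |p.1 - c.1| + |p.2 - c.2|

-- the build loop of find_closest, with its early 'return c' on a zero distance
def pvFcGo (pt : Int × Int) : List (Int × Int) → PySem.Dict (Int × Int) Int → Sum (Int × Int) (PySem.Dict (Int × Int) Int)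
  | [], d => .inr d
  | c :: rest, d =>
      let d' := d.insert c (pvDist pt c)
      if pvDist pt c = 0 then .inl c else pvFcGo pt rest d'

def pvFindClosest (pt : Int × Int) (coords : List (Int × Int)) : Option (Int × Int) :=
  match pvFcGo pt coords PySem.Dict.empty with
  | .inl c => some c
  | .inr dists =>
    match PySem.List.min? dists.items (fun x => x.2) with
    | none => none   -- Python raises ValueError here (coords = []); excluded by Pre_
    | some mindist =>
        if 1 < (dists.values.filter (fun d => d == mindist.2)).length then none
        else some mindist.1

def get_totals (coords : List (Int × Int)) (xmin : Int) (xmax : Int) (ymin : Int) (ymax : Int) : List (Int × Int × Int) :=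
  let totals : PySem.Dict (Int × Int) Int :=
    (PySem.List.pyRange ymin ymax 1).foldl (fun totals y =>
      (PySem.List.pyRange xmin xmax 1).foldl (fun totals x =>
        match pvFindClosest (x, y) coords with
        | none => totals
        | some closest =>
            if totals.contains closest then totals.insert closest (totals.getD closest 0 + 1)
            else totals.insert closest 1) totals) PySem.Dict.empty
  totals.items.map (fun p => (p.1.1, p.1.2, p.2))

-- ===== PORT B =====
-- one pass over the (deduplicated) coordinates: first minimum + tie flag
def pvClosestGo (pt : Int × Int) : List (Int × Int) → (Int × Int) → Int → Bool → Option (Int × Int)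
  | [], best, _, tie => if tie then none else some best
  | c :: rest, best, bestd, tie =>
      let d := |pt.1 - c.1| + |pt.2 - c.2|
      if d < bestd then pvClosestGo pt rest c d false
      else if d = bestd then pvClosestGo pt rest best bestd true
      else pvClosestGo pt rest best bestd tie

def pvClosestUnique (pt : Int × Int) (uniq : List (Int × Int)) : Option (Int × Int) :=
  match uniq with
  | [] => none
  | c :: rest => pvClosestGo pt rest c (|pt.1 - c.1| + |pt.2 - c.2|) false

def get_totals_alt (coords : List (Int × Int)) (xmin : Int) (xmax : Int) (ymin : Int) (ymax : Int) : List (Int × Int × Int) :=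
  let uniq := PySem.List.dedup coords
  let totals : PySem.Dict (Int × Int) Int :=
    (PySem.List.pyRange ymin ymax 1).foldl (fun totals y =>
      (PySem.List.pyRange xmin xmax 1).foldl (fun totals x =>
        match pvClosestUnique (x, y) uniq with
        | none => totals
        | some best => totals.insert best (totals.getD best 0 + 1)) totals) PySem.Dict.empty
  totals.items.map (fun p => (p.1.1, p.1.2, p.2))

-- ===== PRECONDITION & SPEC =====
-- Pre_ excludes exactly the inputs on which A raises ValueError: coords = [] together with a
-- nonempty grid (find_closest then takes min() of an empty dict).
def Pre_get_totals (coords : List (Int × Int)) (xmin : Int) (xmax : Int) (ymin : Int) (ymax : Int) : Prop :=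
  coords ≠ [] ∨ xmax ≤ xmin ∨ ymax ≤ ymin
instance (coords : List (Int × Int)) (xmin : Int) (xmax : Int) (ymin : Int) (ymax : Int) : Decidable (Pre_get_totals coords xmin xmax ymin ymax) := by unfold Pre_get_totals; infer_instance
def pvWitness_get_totals : (List (Int × Int)) × Int × Int × Int × Int := ([(1, 1), (3, 0)], 0, 3, 0, 3)

def Spec_get_totals (coords : List (Int × Int)) (xmin : Int) (xmax : Int) (ymin : Int) (ymax : Int) (out : List (Int × Int × Int)) : Prop := out = get_totals_alt coords xmin xmax ymin ymax
instance (coords : List (Int × Int)) (xmin : Int) (xmax : Int) (ymin : Int) (ymax : Int) (out : List (Int × Int × Int)) : Decidable (Spec_get_totals coords xmin xmax ymin ymax out) := by unfold Spec_get_totals; infer_instance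

-- ===== CLAIM (what is proved, stated in full; the proofs are below) =====
def Claim_equal_get_totals : Prop := ∀ (coords : List (Int × Int)) (xmin : Int) (xmax : Int) (ymin : Int) (ymax : Int), Dom_get_totals coords xmin xmax ymin ymax → Pre_get_totals coords xmin xmax ymin ymax → Spec_get_totals coords xmin xmax ymin ymax (get_totals coords xmin xmax ymin ymax)

-- ===== LEMMAS AND PROOFS =====

theorem pvDist_unfold (p c : Int × Int) : |p.1 - c.1| + |p.2 - c.2| = pvDist p c := rfl

theorem pvDist_nonneg (pt c : Int × Int) : 0 ≤ pvDist pt c := by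
  unfold pvDist
  have h1 := abs_nonneg (pt.1 - c.1)
  have h2 := abs_nonneg (pt.2 - c.2)
  omega

theorem pvDist_eq_zero {pt c : Int × Int} : pvDist pt c = 0 ↔ c = pt := by
  obtain ⟨a, b⟩ := pt; obtain ⟨u, v⟩ := c
  unfold pvDist
  rw [Int.abs_eq_natAbs, Int.abs_eq_natAbs]
  simp only [Prod.mk.injEq]
  omega

theorem pvDist_self (pt : Int × Int) : pvDist pt pt = 0 := by simp [pvDist]

-- the running first-minimum of B's pass
def pvFirstMin (pt : Int × Int) (t : List (Int × Int)) (b : Int × Int) : Int × Int :=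
  t.foldl (fun m x => if pvDist pt x < pvDist pt m then x else m) b

theorem pvFirstMin_cons (pt c : Int × Int) (t : List (Int × Int)) (b : Int × Int) :
    pvFirstMin pt (c :: t) b = pvFirstMin pt t (if pvDist pt c < pvDist pt b then c else b) := rfl

theorem pvFirstMin_le (pt : Int × Int) : ∀ (t : List (Int × Int)) (b : Int × Int),
    pvDist pt (pvFirstMin pt t b) ≤ pvDist pt b ∧ ∀ x ∈ t, pvDist pt (pvFirstMin pt t b) ≤ pvDist pt x
  | [], b => ⟨le_refl _, by simp⟩
  | c :: t, b => by
    rw [pvFirstMin_cons]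
    by_cases h : pvDist pt c < pvDist pt b
    · have ih := pvFirstMin_le pt t c
      rw [if_pos h]
      refine ⟨by omega, ?_⟩
      intro x hx
      rcases List.mem_cons.1 hx with rfl | hx
      · exact ih.1
      · exact ih.2 x hx
    · have ih := pvFirstMin_le pt t b
      rw [if_neg h]
      refine ⟨ih.1, ?_⟩
      intro x hx
      rcases List.mem_cons.1 hx with rfl | hx
      · omega
      · exact ih.2 x hx

theorem pvFirstMin_eq_of_not_lt (pt : Int × Int) : ∀ (t : List (Int × Int)) (b : Int × Int),
    ¬ pvDist pt (pvFirstMin pt t b) < pvDist pt b → pvFirstMin pt t b = b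
  | [], _, _ => rfl
  | c :: t, b, h => by
    rw [pvFirstMin_cons] at h ⊢
    by_cases hc : pvDist pt c < pvDist pt b
    · rw [if_pos hc] at h ⊢
      have hle := (pvFirstMin_le pt t c).1
      exact absurd (by omega : pvDist pt (pvFirstMin pt t c) < pvDist pt b) h
    · rw [if_neg hc] at h ⊢
      exact pvFirstMin_eq_of_not_lt pt t b h

theorem pvFirstMin_mem (pt : Int × Int) : ∀ (t : List (Int × Int)) (b : Int × Int),
    pvFirstMin pt t b = b ∨ pvFirstMin pt t b ∈ t
  | [], _ => .inl rfl
  | c :: t, b => by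
    rw [pvFirstMin_cons]
    by_cases hc : pvDist pt c < pvDist pt b
    · rw [if_pos hc]
      rcases pvFirstMin_mem pt t c with h | h
      · right; rw [h]; exact List.mem_cons_self
      · right; exact List.mem_cons_of_mem _ h
    · rw [if_neg hc]
      rcases pvFirstMin_mem pt t b with h | h
      · left; exact h
      · right; exact List.mem_cons_of_mem _ h

-- B's pass computes: the first minimum, None iff the minimal distance is achieved twice
theorem pvGo_spec (pt : Int × Int) : ∀ (t : List (Int × Int)) (b : Int × Int) (tie : Bool),
    pvClosestGo pt t b (pvDist pt b) tie =
      if pvDist pt (pvFirstMin pt t b) < pvDist pt b then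
        (if 1 < t.countP (fun x => pvDist pt x == pvDist pt (pvFirstMin pt t b)) then none
         else some (pvFirstMin pt t b))
      else
        (if tie = true ∨ 0 < t.countP (fun x => pvDist pt x == pvDist pt b) then none else some b)
  | [], b, tie => by
    simp only [pvClosestGo, pvFirstMin, List.foldl_nil, List.countP_nil, lt_irrefl, if_false]
    cases tie <;> simp
  | c :: t, b, tie => by
    rw [pvFirstMin_cons]
    by_cases h1 : pvDist pt c < pvDist pt b
    · have hstep : pvClosestGo pt (c :: t) b (pvDist pt b) tie
          = pvClosestGo pt t c (pvDist pt c) false := by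
        simp only [pvClosestGo, pvDist_unfold, if_pos h1]
      rw [hstep, pvGo_spec pt t c false]
      simp only [if_pos h1]
      by_cases h2 : pvDist pt (pvFirstMin pt t c) < pvDist pt c
      · rw [if_pos h2]
        rw [if_pos (show pvDist pt (pvFirstMin pt t c) < pvDist pt b from by omega)]
        have hcne : (pvDist pt c == pvDist pt (pvFirstMin pt t c)) = false := by
          simp only [beq_eq_false_iff_ne, ne_eq]; omega
        simp [hcne]
      · have hmc : pvFirstMin pt t c = c := pvFirstMin_eq_of_not_lt pt t c h2
        rw [if_neg h2, hmc]
        rw [if_pos (show pvDist pt c < pvDist pt b from h1)]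
        have hceq : (pvDist pt c == pvDist pt c) = true := by simp
        simp only [List.countP_cons, hceq, if_true, Bool.false_eq_true, false_or]
        by_cases h0 : 0 < t.countP (fun x => pvDist pt x == pvDist pt c)
        · rw [if_pos h0, if_pos (by omega)]
        · rw [if_neg h0, if_neg (by omega)]
    · by_cases h2 : pvDist pt c = pvDist pt b
      · have hstep : pvClosestGo pt (c :: t) b (pvDist pt b) tie
            = pvClosestGo pt t b (pvDist pt b) true := by
          simp only [pvClosestGo, pvDist_unfold, if_neg h1, if_pos h2]
        rw [hstep, pvGo_spec pt t b true]
        simp only [if_neg h1]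
        by_cases h3 : pvDist pt (pvFirstMin pt t b) < pvDist pt b
        · rw [if_pos h3, if_pos h3]
          have hcne : (pvDist pt c == pvDist pt (pvFirstMin pt t b)) = false := by
            simp only [beq_eq_false_iff_ne, ne_eq]; omega
          simp [hcne]
        · rw [if_neg h3, if_neg h3]
          have hceq : (pvDist pt c == pvDist pt b) = true := by simp [h2]
          simp [hceq]
      · have hstep : pvClosestGo pt (c :: t) b (pvDist pt b) tie
            = pvClosestGo pt t b (pvDist pt b) tie := by
          simp only [pvClosestGo, pvDist_unfold, if_neg h1, if_neg h2]
        rw [hstep, pvGo_spec pt t b tie]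
        simp only [if_neg h1]
        by_cases h3 : pvDist pt (pvFirstMin pt t b) < pvDist pt b
        · rw [if_pos h3, if_pos h3]
          have hle := (pvFirstMin_le pt t b).1
          have hcne : (pvDist pt c == pvDist pt (pvFirstMin pt t b)) = false := by
            simp only [beq_eq_false_iff_ne, ne_eq]; omega
          simp [hcne]
        · rw [if_neg h3, if_neg h3]
          have hcne : (pvDist pt c == pvDist pt b) = false := by
            simp only [beq_eq_false_iff_ne, ne_eq]; omega
          have hcc : List.countP (fun x => pvDist pt x == pvDist pt b) (c :: t)
              = List.countP (fun x => pvDist pt x == pvDist pt b) t := by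
            simp [hcne]
          rw [hcc]

-- A's min(dists.items(), key=snd) is the same first minimum
theorem pvMin?_cons (pt : Int × Int) : ∀ (t : List (Int × Int)) (c : Int × Int),
    PySem.List.min? ((c :: t).map (fun x => (x, pvDist pt x))) (fun x => x.2)
      = some (pvFirstMin pt t c, pvDist pt (pvFirstMin pt t c))
  | [], c => by simp [PySem.List.min?, pvFirstMin]
  | x :: t, c => by
    have h1 : PySem.List.min? ((c :: x :: t).map (fun z => (z, pvDist pt z))) (fun z => z.2)
        = PySem.List.min? (((if pvDist pt x < pvDist pt c then x else c) :: t).map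
            (fun z => (z, pvDist pt z))) (fun z => z.2) := by
      simp only [PySem.List.min?, List.map_cons, List.foldl_cons]
      by_cases h : pvDist pt x < pvDist pt c
      · simp [h]
      · simp [h]
    rw [h1, pvMin?_cons pt t _]
    rfl

-- A's build loop: early return iff the cell itself is a coordinate
theorem pvFcGo_zero (pt : Int × Int) : ∀ (coords : List (Int × Int)) (d : PySem.Dict (Int × Int) Int),
    pt ∈ coords → pvFcGo pt coords d = .inl pt
  | c :: rest, d, h => by
    simp only [pvFcGo]
    by_cases hc : pvDist pt c = 0
    · rw [if_pos hc, pvDist_eq_zero.1 hc]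
    · rw [if_neg hc]
      apply pvFcGo_zero
      rcases List.mem_cons.1 h with rfl | h'
      · exact absurd (pvDist_self pt) hc
      · exact h'

theorem pvInsert_pair (pt : Int × Int) (M : List (Int × Int)) (c : Int × Int) :
    (PySem.Dict.mk (M.map (fun x => (x, pvDist pt x)))).insert c (pvDist pt c)
      = PySem.Dict.mk ((PySem.Set.add M c).map (fun x => (x, pvDist pt x))) := by
  by_cases hc : c ∈ M
  · have h1 : (PySem.Dict.mk (M.map (fun x => (x, pvDist pt x)))).contains c = true := by
      simp only [PySem.Dict.contains, List.any_map, List.any_eq_true, Function.comp, beq_iff_eq]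
      exact ⟨c, hc, rfl⟩
    have h2 : PySem.Set.add M c = M := by
      simp [PySem.Set.add, PySem.Set.contains, hc]
    rw [h2]
    simp only [PySem.Dict.insert, h1, if_true, List.map_map]
    congr 1
    apply List.map_congr_left
    intro x hx
    by_cases hxc : x = c
    · subst hxc; simp
    · simp [Function.comp, hxc]
  · have h1 : (PySem.Dict.mk (M.map (fun x => (x, pvDist pt x)))).contains c = false := by
      simp only [PySem.Dict.contains, List.any_map, List.any_eq_true, Function.comp, beq_iff_eq, Bool.eq_false_iff, ne_eq]
      push Not
      intro x hx hxc
      exact hc (hxc ▸ hx)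
    have h2 : PySem.Set.add M c = M ++ [c] := by
      simp [PySem.Set.add, PySem.Set.contains, hc]
    rw [h2]
    simp [PySem.Dict.insert, h1]

theorem pvFcGo_nozero (pt : Int × Int) : ∀ (coords M : List (Int × Int)), pt ∉ coords →
    pvFcGo pt coords (PySem.Dict.mk (M.map (fun x => (x, pvDist pt x))))
      = .inr (PySem.Dict.mk ((coords.foldl PySem.Set.add M).map (fun x => (x, pvDist pt x))))
  | [], _, _ => rfl
  | c :: rest, M, h => by
    simp only [pvFcGo, List.foldl_cons]
    have hc : ¬ pvDist pt c = 0 := by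
      intro h0
      exact h (pvDist_eq_zero.1 h0 ▸ List.mem_cons_self)
    rw [if_neg hc, pvInsert_pair]
    exact pvFcGo_nozero pt rest (PySem.Set.add M c) (fun hm => h (List.mem_cons_of_mem _ hm))

theorem pvCountP_le_one {p : (Int × Int) → Bool} {a : Int × Int} :
    ∀ {t : List (Int × Int)}, t.Nodup → (∀ x ∈ t, p x = true → x = a) → t.countP p ≤ 1
  | [], _, _ => by simp
  | c :: t, hnd, hp => by
    rw [List.countP_cons]
    rcases List.nodup_cons.1 hnd with ⟨hcnotin, hndt⟩
    by_cases hpc : p c = true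
    · have hca := hp c List.mem_cons_self hpc
      have h0 : t.countP p = 0 := by
        rw [List.countP_eq_zero]
        intro x hx hpx
        have hxa := hp x (List.mem_cons_of_mem _ hx) hpx
        exact hcnotin (by rwa [hxa, ← hca] at hx)
      simp [hpc, h0]
    · simp only [hpc]
      exact pvCountP_le_one hndt (fun x hx => hp x (List.mem_cons_of_mem _ hx))

theorem pv_key (pt : Int × Int) (coords : List (Int × Int)) (hne : coords ≠ []) :
    pvFindClosest pt coords = pvClosestUnique pt (PySem.List.dedup coords) := by
  have hmemL : ∀ x, x ∈ PySem.List.dedup coords ↔ x ∈ coords := fun x => PySem.List.mem_dedup coords x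
  have hnodupL : (PySem.List.dedup coords).Nodup := PySem.List.nodup_dedup coords
  obtain ⟨c, t, hct⟩ : ∃ c t, PySem.List.dedup coords = c :: t := by
    cases hL : PySem.List.dedup coords with
    | nil =>
      exfalso
      obtain ⟨z, zs, rfl⟩ := List.exists_cons_of_ne_nil hne
      have : z ∈ PySem.List.dedup (z :: zs) := (hmemL z).2 List.mem_cons_self
      rw [hL] at this
      exact List.not_mem_nil this
    | cons c t => exact ⟨c, t, rfl⟩
  rw [hct] at hmemL hnodupL
  rcases List.nodup_cons.1 hnodupL with ⟨hcnott, hndt⟩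
  have hBdef : pvClosestUnique pt (PySem.List.dedup coords)
      = pvClosestGo pt t c (pvDist pt c) false := by
    rw [hct]; rfl
  by_cases hpt : pt ∈ coords
  · -- A early-returns pt (the only zero-distance coordinate)
    unfold pvFindClosest
    rw [pvFcGo_zero pt coords _ hpt]
    rw [hBdef, pvGo_spec pt t c false]
    by_cases hcpt : c = pt
    · subst hcpt
      have hnotlt : ¬ pvDist c (pvFirstMin c t c) < pvDist c c := by
        have := pvDist_nonneg c (pvFirstMin c t c)
        have := pvDist_self c
        omega
      rw [if_neg hnotlt]
      have hcount : t.countP (fun x => pvDist c x == pvDist c c) = 0 := by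
        rw [List.countP_eq_zero]
        intro x hx hpx
        have : pvDist c x = 0 := by
          have := pvDist_self c
          have := beq_iff_eq.1 hpx
          omega
        exact hcnott ((pvDist_eq_zero.1 this) ▸ hx)
      simp [hcount]
    · have hptt : pt ∈ t := by
        rcases List.mem_cons.1 ((hmemL pt).2 hpt) with h | h
        · exact absurd h.symm hcpt
        · exact h
      have hdc : pvDist pt c ≠ 0 := fun h => hcpt (pvDist_eq_zero.1 h)
      have hm0 : pvDist pt (pvFirstMin pt t c) = 0 := by
        have hle := (pvFirstMin_le pt t c).2 pt hptt
        have := pvDist_nonneg pt (pvFirstMin pt t c)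
        have := pvDist_self pt
        omega
      have hlt : pvDist pt (pvFirstMin pt t c) < pvDist pt c := by
        have := pvDist_nonneg pt c
        omega
      rw [if_pos hlt]
      have hcle : t.countP (fun x => pvDist pt x == pvDist pt (pvFirstMin pt t c)) ≤ 1 :=
        pvCountP_le_one (a := pt) hndt (fun x _ hpx => by
          have : pvDist pt x = 0 := by
            have := beq_iff_eq.1 hpx
            omega
          exact pvDist_eq_zero.1 this)
      rw [if_neg (by omega), pvDist_eq_zero.1 hm0]
  · -- no zero distance: the dict of find_closest holds exactly the distinct coordinates
    unfold pvFindClosest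
    have hdict : pvFcGo pt coords PySem.Dict.empty
        = .inr (PySem.Dict.mk ((c :: t).map (fun x => (x, pvDist pt x)))) := by
      have h0 := pvFcGo_nozero pt coords [] hpt
      simp only [List.map_nil] at h0
      rw [show PySem.Dict.empty = PySem.Dict.mk ([] : List ((Int × Int) × Int)) from rfl, h0]
      rw [show coords.foldl PySem.Set.add [] = PySem.List.dedup coords from rfl, hct]
    simp only [hdict]
    rw [pvMin?_cons pt t c]
    show (if 1 < (List.filter (fun d => d == pvDist pt (pvFirstMin pt t c))
            (((c :: t).map (fun x => (x, pvDist pt x))).map (fun x => x.2))).length then none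
          else some (pvFirstMin pt t c)) = pvClosestUnique pt (PySem.List.dedup coords)
    have hflt : ((((c :: t).map (fun x => (x, pvDist pt x))).map (fun x => x.2)).filter
          (fun d => d == pvDist pt (pvFirstMin pt t c))).length
        = (c :: t).countP (fun x => pvDist pt x == pvDist pt (pvFirstMin pt t c)) := by
      rw [← List.countP_eq_length_filter, List.countP_map, List.countP_map]
      rfl
    rw [hflt, hBdef, pvGo_spec pt t c false]
    by_cases hlt : pvDist pt (pvFirstMin pt t c) < pvDist pt c
    · rw [if_pos hlt]
      have hcne : (pvDist pt c == pvDist pt (pvFirstMin pt t c)) = false := by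
        simp only [beq_eq_false_iff_ne, ne_eq]; omega
      simp [hcne]
    · have hmc : pvFirstMin pt t c = c := pvFirstMin_eq_of_not_lt pt t c hlt
      rw [if_neg hlt, hmc]
      have hceq : (pvDist pt c == pvDist pt c) = true := by simp
      simp only [List.countP_cons, hceq, if_true, Bool.false_eq_true, false_or]
      by_cases h0 : 0 < t.countP (fun x => pvDist pt x == pvDist pt c)
      · rw [if_pos (by omega), if_pos h0]
      · rw [if_neg (by omega), if_neg h0]

theorem pv_update (coords : List (Int × Int)) (hne : coords ≠ [])
    (totals : PySem.Dict (Int × Int) Int) (x y : Int) :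
    (match pvFindClosest (x, y) coords with
     | none => totals
     | some closest =>
         if totals.contains closest then totals.insert closest (totals.getD closest 0 + 1)
         else totals.insert closest 1)
    = (match pvClosestUnique (x, y) (PySem.List.dedup coords) with
       | none => totals
       | some best => totals.insert best (totals.getD best 0 + 1)) := by
  rw [← pv_key _ _ hne]
  cases h : pvFindClosest (x, y) coords with
  | none => rfl
  | some b =>
    by_cases hb : totals.contains b = true
    · simp [hb]
    · have hb' : totals.contains b = false := Bool.eq_false_iff.2 hb
      have hg : totals.getD b 0 = 0 := PySem.Dict.getD_of_not_contains totals 0 hb'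
      simp [hb', hg]

theorem pvFoldConst {α : Type} (l : List Int) (t : α) : l.foldl (fun t _ => t) t = t := by
  induction l generalizing t with
  | nil => rfl
  | cons a l ih => simp [List.foldl_cons, ih]

theorem pvRange_one_nil {a b : Int} (h : b ≤ a) : PySem.List.pyRange a b 1 = [] := by
  simp [PySem.List.pyRange, show ¬(a < b) by omega]

theorem pv_main (coords : List (Int × Int)) (xmin xmax ymin ymax : Int) (hne : coords ≠ []) :
    get_totals coords xmin xmax ymin ymax = get_totals_alt coords xmin xmax ymin ymax := by
  simp only [get_totals, get_totals_alt]
  have h2 : (fun (totals : PySem.Dict (Int × Int) Int) (y : Int) =>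
        (PySem.List.pyRange xmin xmax 1).foldl (fun totals x =>
          match pvFindClosest (x, y) coords with
          | none => totals
          | some closest =>
              if totals.contains closest then totals.insert closest (totals.getD closest 0 + 1)
              else totals.insert closest 1) totals)
      = (fun (totals : PySem.Dict (Int × Int) Int) (y : Int) =>
        (PySem.List.pyRange xmin xmax 1).foldl (fun totals x =>
          match pvClosestUnique (x, y) (PySem.List.dedup coords) with
          | none => totals
          | some best => totals.insert best (totals.getD best 0 + 1)) totals) := by
    funext totals y
    have hf : (fun (totals : PySem.Dict (Int × Int) Int) (x : Int) =>
          match pvFindClosest (x, y) coords with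
          | none => totals
          | some closest =>
              if totals.contains closest then totals.insert closest (totals.getD closest 0 + 1)
              else totals.insert closest 1)
        = (fun (totals : PySem.Dict (Int × Int) Int) (x : Int) =>
          match pvClosestUnique (x, y) (PySem.List.dedup coords) with
          | none => totals
          | some best => totals.insert best (totals.getD best 0 + 1)) :=
      funext fun totals => funext fun x => pv_update coords hne totals x y
    rw [hf]
  rw [h2]


-- ===== VERDICT (by name: the statement is the Claim_ definition above) =====
theorem get_totals_spec : Claim_equal_get_totals := by
  intro coords xmin xmax ymin ymax _ hpre
  unfold Spec_get_totals
  by_cases hne : coords = []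
  · subst hne
    unfold Pre_get_totals at hpre
    rcases hpre with h | h | h
    · exact absurd rfl h
    · simp only [get_totals, get_totals_alt, pvRange_one_nil h, List.foldl_nil, pvFoldConst]
    · simp only [get_totals, get_totals_alt, pvRange_one_nil h, List.foldl_nil]
  · exact pv_main coords xmin xmax ymin ymax hne
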